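-- pv_equiv track=rewrite | github.com/jopatk123/CoordTrans | backend/app/utils.py | process_geo_results
-- ===== SOURCE A (Python) =====
-- from typing import Tuple, List, Optional, Any
--
-- def process_geo_results(results: List[Optional[dict]]) -> dict:
--     """
--     处理地理编码结果，提取所需字段
--
--     Args:
--         results: API 返回的结果列表
--
--     Returns:
--         dict: 包含各字段列表的字典
--     """
--     data = {
--         'longitude': [],
--         'latitude': [],
--         'formatted_address': [],
--         'province': [],
--         'city': [],
--         'district': []
--     }
--
--     for res in results:
--         if res:
--             loc = res.get('location', ',').split(',')
--             data['longitude'].append(loc[0] if len(loc) > 0 else '')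
--             data['latitude'].append(loc[1] if len(loc) > 1 else '')
--             data['formatted_address'].append(res.get('formatted_address', ''))
--             data['province'].append(res.get('province', ''))
--             data['city'].append(res.get('city', ''))
--             data['district'].append(res.get('district', ''))
--         else:
--             for key in data:
--                 data[key].append('')
--
--     return data
-- ===== SOURCE B (Python) =====
-- def process_geo_results(results):
--     """Produce one 6-tuple row per result, then pivot the rows into columns."""
--     keys = ('longitude', 'latitude', 'formatted_address', 'province', 'city', 'district')
--
--     def row(res):
--         if not res:
--             return ('',) * 6
--         loc = res.get('location', ',').split(',')
--         return (loc[0] if loc else '',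
--                 loc[1] if len(loc) > 1 else '',
--                 res.get('formatted_address', ''),
--                 res.get('province', ''),
--                 res.get('city', ''),
--                 res.get('district', ''))
--
--     rows = [row(res) for res in results]
--     cols = zip(*rows) if rows else ((),) * 6
--     return {k: list(c) for k, c in zip(keys, cols)}
-- ===== Notes on version B (the rewrite author's own statement) =====
-- stated objective: alternative
-- what changed: A mutates six per-key accumulator lists inside a dict while looping; B maps each result to a 6-tuple row and transposes the row list with zip(*rows) into the six columns.
import Mathlib
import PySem

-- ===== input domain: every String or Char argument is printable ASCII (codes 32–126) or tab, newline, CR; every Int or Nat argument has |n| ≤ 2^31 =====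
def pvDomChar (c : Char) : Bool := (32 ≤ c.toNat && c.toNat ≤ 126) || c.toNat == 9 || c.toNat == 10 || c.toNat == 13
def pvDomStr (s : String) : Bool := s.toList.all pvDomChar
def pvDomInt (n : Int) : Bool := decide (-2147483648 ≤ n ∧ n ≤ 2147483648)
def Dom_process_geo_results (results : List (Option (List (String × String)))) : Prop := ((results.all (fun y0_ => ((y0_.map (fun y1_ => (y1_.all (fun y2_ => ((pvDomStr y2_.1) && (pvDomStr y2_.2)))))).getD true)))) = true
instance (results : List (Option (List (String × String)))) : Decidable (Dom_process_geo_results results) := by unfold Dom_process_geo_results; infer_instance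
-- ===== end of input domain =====

-- B builds one 6-tuple row per result and transposes the row list into the six
-- columns, instead of A's in-loop appends into six dict-held lists (objective: alternative).

-- res.get(k, dflt): first match in the association list (shared lookup helper)
def pgrGet (r : List (String × String)) (k dflt : String) : String :=
  match r with
  | [] => dflt
  | (k', v) :: rest => if k' = k then v else pgrGet rest k dflt

-- ===== PORT A =====
-- data[key].append(v) on the association-list dict (key is always present)
def pgrAppend (data : List (String × List String)) (k : String) (v : String) :
    List (String × List String) :=
  match data with
  | [] => []
  | (k', l) :: rest => if k' = k then (k', l ++ [v]) :: rest else (k', l) :: pgrAppend rest k v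

def process_geo_results (results : List (Option (List (String × String)))) :
    List (String × List String) :=
  results.foldl (fun data res =>
    match res with
    | some r =>
      if r ≠ [] then
        let loc := (PySem.Str.split? (pgrGet r "location" ",") ",").getD []
        let data := pgrAppend data "longitude" (if loc.length > 0 then PySem.List.pyGetD loc 0 "" else "")
        let data := pgrAppend data "latitude" (if loc.length > 1 then PySem.List.pyGetD loc 1 "" else "")
        let data := pgrAppend data "formatted_address" (pgrGet r "formatted_address" "")
        let data := pgrAppend data "province" (pgrGet r "province" "")
        let data := pgrAppend data "city" (pgrGet r "city" "")
        pgrAppend data "district" (pgrGet r "district" "")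
      else
        -- for key in data: data[key].append('')
        (data.map (·.1)).foldl (fun d k => pgrAppend d k "") data
    | none => (data.map (·.1)).foldl (fun d k => pgrAppend d k "") data)
    [("longitude", []), ("latitude", []), ("formatted_address", []),
     ("province", []), ("city", []), ("district", [])]

-- ===== PORT B =====
def pvRow (res : Option (List (String × String))) :
    String × String × String × String × String × String :=
  match res with
  | none => ("", "", "", "", "", "")
  | some r =>
    if r = [] then ("", "", "", "", "", "")
    else
      let loc := (PySem.Str.split? (pgrGet r "location" ",") ",").getD []
      ((if loc ≠ [] then PySem.List.pyGetD loc 0 "" else ""),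
       (if loc.length > 1 then PySem.List.pyGetD loc 1 "" else ""),
       pgrGet r "formatted_address" "", pgrGet r "province" "",
       pgrGet r "city" "", pgrGet r "district" "")

-- zip(*rows): the six columns are the six component projections of the row list
def process_geo_results_alt (results : List (Option (List (String × String)))) :
    List (String × List String) :=
  let rows := results.map pvRow
  [("longitude", rows.map (·.1)),
   ("latitude", rows.map (·.2.1)),
   ("formatted_address", rows.map (·.2.2.1)),
   ("province", rows.map (·.2.2.2.1)),
   ("city", rows.map (·.2.2.2.2.1)),
   ("district", rows.map (·.2.2.2.2.2))]

-- ===== PRECONDITION & SPEC =====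
def Spec_process_geo_results (results : List (Option (List (String × String)))) (out : List (String × List String)) : Prop := out = process_geo_results_alt results
instance (results : List (Option (List (String × String)))) (out : List (String × List String)) : Decidable (Spec_process_geo_results results out) := by unfold Spec_process_geo_results; infer_instance

-- ===== CLAIM (what is proved, stated in full; the proofs are below) =====
def Claim_equal_process_geo_results : Prop := ∀ (results : List (Option (List (String × String)))), Dom_process_geo_results results → Spec_process_geo_results results (process_geo_results results)

-- ===== LEMMAS AND PROOFS =====

-- A's loop body, named for the proofs (definitionally equal to the lambda in port A)
def pgrStep (data : List (String × List String)) (res : Option (List (String × String))) :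
    List (String × List String) :=
  match res with
  | some r =>
    if r ≠ [] then
      let loc := (PySem.Str.split? (pgrGet r "location" ",") ",").getD []
      let data := pgrAppend data "longitude" (if loc.length > 0 then PySem.List.pyGetD loc 0 "" else "")
      let data := pgrAppend data "latitude" (if loc.length > 1 then PySem.List.pyGetD loc 1 "" else "")
      let data := pgrAppend data "formatted_address" (pgrGet r "formatted_address" "")
      let data := pgrAppend data "province" (pgrGet r "province" "")
      let data := pgrAppend data "city" (pgrGet r "city" "")
      pgrAppend data "district" (pgrGet r "district" "")
    else (data.map (·.1)).foldl (fun d k => pgrAppend d k "") data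
  | none => (data.map (·.1)).foldl (fun d k => pgrAppend d k "") data

-- one step of A's loop on the six-column state appends exactly B's row for `res`
lemma pgrStep_eq (res : Option (List (String × String))) (l1 l2 l3 l4 l5 l6 : List String) :
    pgrStep [("longitude", l1), ("latitude", l2), ("formatted_address", l3),
             ("province", l4), ("city", l5), ("district", l6)] res =
    [("longitude", l1 ++ [(pvRow res).1]), ("latitude", l2 ++ [(pvRow res).2.1]),
     ("formatted_address", l3 ++ [(pvRow res).2.2.1]), ("province", l4 ++ [(pvRow res).2.2.2.1]),
     ("city", l5 ++ [(pvRow res).2.2.2.2.1]), ("district", l6 ++ [(pvRow res).2.2.2.2.2])] := by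
  match res with
  | none => simp [pgrStep, pgrAppend, pvRow]
  | some r =>
    by_cases hr : r = []
    · subst hr; simp [pgrStep, pgrAppend, pvRow]
    · cases hl : (PySem.Str.split? (pgrGet r "location" ",") ",").getD [] <;>
        simp [pgrStep, pgrAppend, pvRow, hr, hl]

-- loop invariant: folding A's step over `results` from columns l1..l6 appends the
-- six projections of B's rows
lemma pgr_fold_inv (results : List (Option (List (String × String))))
    (l1 l2 l3 l4 l5 l6 : List String) :
    results.foldl pgrStep
      [("longitude", l1), ("latitude", l2), ("formatted_address", l3),
       ("province", l4), ("city", l5), ("district", l6)] =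
    [("longitude", l1 ++ (results.map pvRow).map (·.1)),
     ("latitude", l2 ++ (results.map pvRow).map (·.2.1)),
     ("formatted_address", l3 ++ (results.map pvRow).map (·.2.2.1)),
     ("province", l4 ++ (results.map pvRow).map (·.2.2.2.1)),
     ("city", l5 ++ (results.map pvRow).map (·.2.2.2.2.1)),
     ("district", l6 ++ (results.map pvRow).map (·.2.2.2.2.2))] := by
  induction results generalizing l1 l2 l3 l4 l5 l6 with
  | nil => simp
  | cons res rest ih =>
    rw [List.foldl_cons, pgrStep_eq, ih]
    simp

-- ===== VERDICT (by name: the statement is the Claim_ definition above) =====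
theorem process_geo_results_spec : Claim_equal_process_geo_results := by
  intro results _
  show process_geo_results results = process_geo_results_alt results
  have h : process_geo_results results =
      results.foldl pgrStep
        [("longitude", []), ("latitude", []), ("formatted_address", []),
         ("province", []), ("city", []), ("district", [])] := rfl
  rw [h, pgr_fold_inv]
  simp [process_geo_results_alt]
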